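-- pv_equiv track=rewrite | github.com/kernighan/archeage-3mle | 3mle-archeage.py | fix_n_notes
-- ===== SOURCE A (Python) =====
-- def fix_n_notes(strng):
--     notes = ["c","c+","d","d+","e","f","f+","g","g+","a","a+","b"]
--     buf, curoctave, i = [], 4, 0
--     while i < len(strng):
--         if strng[i] == "<":
--             curoctave -= 1
--         if strng[i] == ">":
--             curoctave += 1
--         if strng[i] == ",":
--             curoctave = 4
--         if strng[i] == "o":
--             curoctave = int(strng[i+1])
--         if strng[i] == "n":
--             nbuf = []
--             inc=1
--             if strng[i+2].isdigit():
--                 if strng[i+3].isdigit():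
--                     nbuf.extend((strng[i+1],strng[i+2],strng[i+3]))
--                     inc+=2
--                 else:
--                     nbuf.extend((strng[i+1],strng[i+2]))
--                     inc+=1
--             else:
--                 nbuf.append(strng[i+1])
--             nbuf = ''.join(nbuf)
--             nbuf = int(nbuf)
--             text_note = notes[nbuf %12]
--             note_octave = nbuf//12
--             note_shift = abs(note_octave - curoctave)
--             upshift = ">" * note_shift
--             downshift = "<" * note_shift
--             if curoctave > note_octave:
--                 buf.append(downshift)
--                 buf.append(text_note)
--                 buf.append(upshift)
--             else:
--                 buf.append(upshift)
--                 buf.append(text_note)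
--                 buf.append(downshift)
--             i+=inc
--         else:
--             buf.append(strng[i])
--         i+=1
--     return ''.join(buf)
-- ===== SOURCE B (Python) =====
-- def fix_n_notes(strng):
--     NOTES = ["c","c+","d","d+","e","f","f+","g","g+","a","a+","b"]
--     # phase 1: tokenize into single-char literals and numeric n-tokens
--     toks = []
--     i = 0
--     while i < len(strng):
--         c = strng[i]
--         if c == "n":
--             j = i + 1
--             if strng[i+2].isdigit():
--                 j = i + 3 if strng[i+3].isdigit() else i + 2
--             toks.append(int(strng[i+1:j+1]))
--             i = j + 1
--         else:
--             toks.append(c)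
--             i += 1
--     # phase 2: render, tracking the current octave
--     out = []
--     cur = 4
--     for k, t in enumerate(toks):
--         if isinstance(t, int):
--             note = NOTES[t % 12]
--             octv = t // 12
--             shift = abs(octv - cur)
--             if cur > octv:
--                 out.append("<" * shift + note + ">" * shift)
--             else:
--                 out.append(">" * shift + note + "<" * shift)
--         else:
--             if t == "<":
--                 cur -= 1
--             elif t == ">":
--                 cur += 1
--             elif t == ",":
--                 cur = 4
--             elif t == "o":
--                 cur = int(toks[k+1])
--             out.append(t)
--     return "".join(out)
-- ===== Notes on version B (the rewrite author's own statement) =====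
-- stated objective: alternative
-- what changed: replaces A's single interleaved while-loop with a two-phase pipeline: a tokenizer that turns the MML string into literal/number tokens with the same greedy lookahead, then a separate renderer that walks the token list tracking the current octave and emits the output per token
import Mathlib
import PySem

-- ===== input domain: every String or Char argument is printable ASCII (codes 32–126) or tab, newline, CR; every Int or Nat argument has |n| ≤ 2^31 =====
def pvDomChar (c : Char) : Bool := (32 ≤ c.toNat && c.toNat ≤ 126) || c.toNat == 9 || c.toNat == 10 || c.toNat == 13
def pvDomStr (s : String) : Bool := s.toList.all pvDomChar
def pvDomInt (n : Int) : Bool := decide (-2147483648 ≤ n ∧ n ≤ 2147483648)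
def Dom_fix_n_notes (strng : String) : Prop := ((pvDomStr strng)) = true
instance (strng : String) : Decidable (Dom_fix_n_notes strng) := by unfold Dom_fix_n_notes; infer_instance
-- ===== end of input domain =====

-- B is a two-phase re-decomposition (tokenize, then render); equivalence is about the return value only.

-- ===== PORT A =====
def pvNotesA : List (List Char) :=
  [['c'], ['c','+'], ['d'], ['d','+'], ['e'], ['f'], ['f','+'], ['g'], ['g','+'], ['a'], ['a','+'], ['b']]

-- the while loop of A; strings handled as List Char, buf is the list of appended pieces.
-- Out-of-range reads (Python IndexError) and failed int() (ValueError) are excluded by Pre_;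
-- there the port uses a harmless default (' ' / 0).  Char.isDigit = str.isdigit on the ASCII domain.
def fixALoop (cs : List Char) (buf : List (List Char)) (cur : Int) (i : Nat) : List (List Char) :=
  if h : i < cs.length then
    let c := cs[i]
    let cur1 := if c = '<' then cur - 1 else cur
    let cur2 := if c = '>' then cur1 + 1 else cur1
    let cur3 := if c = ',' then (4 : Int) else cur2
    let cur4 := if c = 'o' then (PySem.Int.ofChars? [cs.getD (i+1) ' ']).getD cur3 else cur3
    if c = 'n' then
      let nbufinc : List Char × Nat :=
        if (cs.getD (i+2) ' ').isDigit then
          if (cs.getD (i+3) ' ').isDigit then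
            ([cs.getD (i+1) ' ', cs.getD (i+2) ' ', cs.getD (i+3) ' '], 3)
          else ([cs.getD (i+1) ' ', cs.getD (i+2) ' '], 2)
        else ([cs.getD (i+1) ' '], 1)
      let n := (PySem.Int.ofChars? nbufinc.1).getD 0
      let textNote := pvNotesA.getD (PySem.Int.mod n 12).toNat []
      let noteOctave := PySem.Int.floordiv n 12
      let noteShift := (noteOctave - cur4).natAbs
      let upshift := List.replicate noteShift '>'
      let downshift := List.replicate noteShift '<'
      let pieces := if cur4 > noteOctave then [downshift, textNote, upshift]
                    else [upshift, textNote, downshift]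
      fixALoop cs (buf ++ pieces) cur4 (i + nbufinc.2 + 1)
    else
      fixALoop cs (buf ++ [[c]]) cur4 (i + 1)
  else buf
termination_by cs.length - i
decreasing_by all_goals omega

def fix_n_notes (strng : String) : String :=
  String.ofList (fixALoop strng.toList [] 4 0).flatten

-- ===== PORT B =====
def pvNotesB : List (List Char) :=
  [['c'], ['c','+'], ['d'], ['d','+'], ['e'], ['f'], ['f','+'], ['g'], ['g','+'], ['a'], ['a','+'], ['b']]

inductive PvTok where
  | lit : Char → PvTok
  | num : Int → PvTok
deriving DecidableEq, Repr

-- phase 1: tokenize (same defaults for the Pre_-excluded IndexError/ValueError paths)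
def pvTokenize (cs : List Char) (i : Nat) : List PvTok :=
  if h : i < cs.length then
    let c := cs[i]
    if c = 'n' then
      let j := if (cs.getD (i+2) ' ').isDigit then
                 (if (cs.getD (i+3) ' ').isDigit then i + 3 else i + 2)
               else i + 1
      PvTok.num ((PySem.Int.ofChars? (PySem.List.slice cs (some ((i:Int)+1)) (some ((j:Int)+1)))).getD 0)
        :: pvTokenize cs (j + 1)
    else
      PvTok.lit c :: pvTokenize cs (i + 1)
  else []
termination_by cs.length - i
decreasing_by all_goals (first | omega | (split_ifs <;> omega))

-- phase 2: render the token list, tracking the current octave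
def pvPhase2 (toks : List PvTok) (cur : Int) : List (List Char) :=
  match toks with
  | [] => []
  | PvTok.num n :: rest =>
      let note := pvNotesB.getD (PySem.Int.mod n 12).toNat []
      let octv := PySem.Int.floordiv n 12
      let shift := (octv - cur).natAbs
      (if cur > octv then List.replicate shift '<' ++ note ++ List.replicate shift '>'
       else List.replicate shift '>' ++ note ++ List.replicate shift '<') :: pvPhase2 rest cur
  | PvTok.lit c :: rest =>
      let cur' := if c = '<' then cur - 1
                  else if c = '>' then cur + 1
                  else if c = ',' then (4 : Int)
                  else if c = 'o' then
                    (match rest.head? with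
                     | some (PvTok.lit d) => (PySem.Int.ofChars? [d]).getD cur  -- int(toks[k+1])
                     | some (PvTok.num m) => m
                     | none => cur)
                  else cur
      [c] :: pvPhase2 rest cur'

def fix_n_notes_alt (strng : String) : String :=
  String.ofList (pvPhase2 (pvTokenize strng.toList 0) 4).flatten

-- ===== PRECONDITION & SPEC =====
-- A's n-token lookahead, used only to state Pre_
def pvNbuf (cs : List Char) (i : Nat) : List Char :=
  if (cs.getD (i+2) ' ').isDigit then
    if (cs.getD (i+3) ' ').isDigit then [cs.getD (i+1) ' ', cs.getD (i+2) ' ', cs.getD (i+3) ' ']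
    else [cs.getD (i+1) ' ', cs.getD (i+2) ' ']
  else [cs.getD (i+1) ' ']

-- exactly the inputs where A returns: every 'n' has its two/three lookahead positions in range and
-- an int()-parsable digit group, every 'o' is followed by an in-range digit (else IndexError/ValueError).
def Pre_fix_n_notes (strng : String) : Prop :=
  ∀ i, i < strng.toList.length →
    (strng.toList.getD i ' ' = 'n' →
      i + 2 < strng.toList.length ∧
      ((strng.toList.getD (i+2) ' ').isDigit → i + 3 < strng.toList.length) ∧
      (PySem.Int.ofChars? (pvNbuf strng.toList i)).isSome) ∧
    (strng.toList.getD i ' ' = 'o' →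
      i + 1 < strng.toList.length ∧ (strng.toList.getD (i+1) ' ').isDigit)

instance (strng : String) : Decidable (Pre_fix_n_notes strng) := by unfold Pre_fix_n_notes; infer_instance

def pvWitness_fix_n_notes : String := "o5n60x"

def Spec_fix_n_notes (strng : String) (out : String) : Prop := out = fix_n_notes_alt strng
instance (strng : String) (out : String) : Decidable (Spec_fix_n_notes strng out) := by unfold Spec_fix_n_notes; infer_instance

-- ===== CLAIM (what is proved, stated in full; the proofs are below) =====
def Claim_equal_fix_n_notes : Prop := ∀ (strng : String), Dom_fix_n_notes strng → Pre_fix_n_notes strng → Spec_fix_n_notes strng (fix_n_notes strng)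

-- ===== LEMMAS AND PROOFS =====

theorem pv_getD_eq {cs : List Char} {i : Nat} (h : i < cs.length) : cs.getD i ' ' = cs[i] := by
  simp [List.getD_eq_getElem?_getD, List.getElem?_eq_getElem h]

theorem pv_notes_eq : pvNotesB = pvNotesA := rfl

-- slice cs (i+1) (j+1) spelled out for the three lookahead widths
theorem pv_slice1 {cs : List Char} {i : Nat} (h : i + 1 < cs.length) :
    PySem.List.slice cs (some ((i : Int) + 1)) (some ((i : Int) + 1 + 1)) = [cs[i+1]] := by
  rw [show ((i : Int) + 1 + 1) = ((i + 2 : Nat) : Int) by push_cast; ring,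
      show ((i : Int) + 1) = ((i + 1 : Nat) : Int) by push_cast; ring,
      PySem.List.slice_natCast]
  refine List.ext_getElem (by simp; omega) ?_
  intro k hk1 hk2
  have hk : k < 1 := by simp at hk2; omega
  interval_cases k <;> simp

theorem pv_slice2 {cs : List Char} {i : Nat} (h : i + 2 < cs.length) :
    PySem.List.slice cs (some ((i : Int) + 1)) (some ((i : Int) + 2 + 1)) = [cs[i+1], cs[i+2]] := by
  rw [show ((i : Int) + 2 + 1) = ((i + 3 : Nat) : Int) by push_cast; ring,
      show ((i : Int) + 1) = ((i + 1 : Nat) : Int) by push_cast; ring,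
      PySem.List.slice_natCast]
  refine List.ext_getElem (by simp; omega) ?_
  intro k hk1 hk2
  have hk : k < 2 := by simp at hk2; omega
  interval_cases k <;> simp <;> congr 1 <;> omega

theorem pv_slice3 {cs : List Char} {i : Nat} (h : i + 3 < cs.length) :
    PySem.List.slice cs (some ((i : Int) + 1)) (some ((i : Int) + 3 + 1)) =
      [cs[i+1], cs[i+2], cs[i+3]] := by
  rw [show ((i : Int) + 3 + 1) = ((i + 4 : Nat) : Int) by push_cast; ring,
      show ((i : Int) + 1) = ((i + 1 : Nat) : Int) by push_cast; ring,
      PySem.List.slice_natCast]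
  refine List.ext_getElem (by simp; omega) ?_
  intro k hk1 hk2
  have hk : k < 3 := by simp at hk2; omega
  interval_cases k <;> simp <;> congr 1 <;> omega

theorem pv_main (cs : List Char)
    (hpre : ∀ i, i < cs.length →
      (cs.getD i ' ' = 'n' →
        i + 2 < cs.length ∧ ((cs.getD (i+2) ' ').isDigit → i + 3 < cs.length) ∧
        (PySem.Int.ofChars? (pvNbuf cs i)).isSome) ∧
      (cs.getD i ' ' = 'o' → i + 1 < cs.length ∧ (cs.getD (i+1) ' ').isDigit)) :
    ∀ fuel i cur buf, cs.length - i ≤ fuel →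
      (fixALoop cs buf cur i).flatten = buf.flatten ++ (pvPhase2 (pvTokenize cs i) cur).flatten := by
  intro fuel
  induction fuel with
  | zero =>
    intro i cur buf hle
    have hni : ¬ i < cs.length := by omega
    rw [fixALoop.eq_def, pvTokenize.eq_def]
    simp [hni, pvPhase2]
  | succ fuel ih =>
    intro i cur buf hle
    by_cases h : i < cs.length
    · have hgi : cs.getD i ' ' = cs[i] := pv_getD_eq h
      rw [fixALoop.eq_def, pvTokenize.eq_def]
      by_cases hc : cs[i] = 'n'
      · -- the n-token case
        obtain ⟨h2, h3, _⟩ := (hpre i h).1 (by rw [hgi, hc])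
        have g1 : cs.getD (i+1) ' ' = cs[i+1] := pv_getD_eq (by omega)
        have g1' : cs[i+1]? = some cs[i+1] := List.getElem?_eq_getElem (by omega)
        have g2 : cs.getD (i+2) ' ' = cs[i+2] := pv_getD_eq h2
        have g2' : cs[i+2]? = some cs[i+2] := List.getElem?_eq_getElem h2
        by_cases d2 : (cs[i+2]).isDigit
        · have h3' : i + 3 < cs.length := h3 (by rw [g2]; exact d2)
          have g3 : cs.getD (i+3) ' ' = cs[i+3] := pv_getD_eq h3'
          have g3' : cs[i+3]? = some cs[i+3] := List.getElem?_eq_getElem h3'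
          by_cases d3 : (cs[i+3]).isDigit
          · simp [h, hc, g1, g1', g2, g2', g3, g3', d2, d3, pv_slice3 h3', pvPhase2, pv_notes_eq]
            (first
              | rw [ih (i + 3 + 1) _ _ (by omega)]
              | rw [ih (i + 4) _ _ (by omega)])
            split_ifs <;> simp
          · simp [h, hc, g1, g1', g2, g2', g3, g3', d2, d3, pv_slice2 h2, pvPhase2, pv_notes_eq]
            (first
              | rw [ih (i + 2 + 1) _ _ (by omega)]
              | rw [ih (i + 3) _ _ (by omega)])
            split_ifs <;> simp
        · simp [h, hc, g1, g1', g2, g2', d2, pv_slice1 (show i + 1 < cs.length by omega), pvPhase2,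
            pv_notes_eq]
          (first
            | rw [ih (i + 1 + 1) _ _ (by omega)]
            | rw [ih (i + 2) _ _ (by omega)])
          split_ifs <;> simp
      · -- the literal case: one character, octave bookkeeping
        by_cases e4 : cs[i] = 'o'
        · obtain ⟨ho1, ho2⟩ := (hpre i h).2 (by rw [hgi, e4])
          have g1 : cs.getD (i+1) ' ' = cs[i+1] := pv_getD_eq ho1
          have g1' : cs[i+1]? = some cs[i+1] := List.getElem?_eq_getElem ho1
          have hd : (cs[i+1]).isDigit := by rw [g1] at ho2; exact ho2
          have hn1 : ¬ cs[i+1] = 'n' := by intro hh; rw [hh] at hd; simp [Char.isDigit] at hd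
          have htok : pvTokenize cs (i+1) = PvTok.lit cs[i+1] :: pvTokenize cs (i + 1 + 1) := by
            rw [pvTokenize.eq_def]
            simp [ho1, hn1]
          simp [h, hc, e4, g1, g1']
          rw [ih (i + 1) _ _ (by omega)]
          simp [pvPhase2, htok, e4, g1']
        · by_cases e1 : cs[i] = '<'
          · simp [h, hc, e1]
            rw [ih (i + 1) _ _ (by omega)]
            simp [pvPhase2, e1]
          · by_cases e2 : cs[i] = '>'
            · simp [h, hc, e2]
              rw [ih (i + 1) _ _ (by omega)]
              simp [pvPhase2, e2]
            · by_cases e3 : cs[i] = ','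
              · simp [h, hc, e3]
                rw [ih (i + 1) _ _ (by omega)]
                simp [pvPhase2, e3]
              · simp [h, hc, e1, e2, e3, e4]
                rw [ih (i + 1) _ _ (by omega)]
                simp [pvPhase2, e1, e2, e3, e4]
    · rw [fixALoop.eq_def, pvTokenize.eq_def]
      simp [h, pvPhase2]

-- ===== VERDICT (by name: the statement is the Claim_ definition above) =====
theorem fix_n_notes_spec : Claim_equal_fix_n_notes := by
  intro strng _hdom hpre
  unfold Spec_fix_n_notes fix_n_notes fix_n_notes_alt
  have h := pv_main strng.toList hpre strng.toList.length 0 4 [] (by omega)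
  simp only [List.flatten_nil, List.nil_append] at h
  rw [h]
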